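-- pv_equiv track=rewrite | github.com/Lammatian/AdventOfCode | 2016/src/day18/main.py | part1
-- ===== SOURCE A (Python) =====
-- def part1(inp):
--     result = [inp]
--     count = inp.count('.')
--     last = inp
--     for i in range(39):
--         new_row = ''
--         for i in range(len(last)):
--             a = last[i - 1] if i - 1 >= 0 else '.'
--             b = last[i]
--             c = last[i + 1] if i + 1 < len(last) else '.'
--             if a + b + c == '^^.':
--                 new_row += '^'
--             elif a + b + c == '.^^':
--                 new_row += '^'
--             elif a + b + c == '^..':
--                 new_row += '^'
--             elif a + b + c == '..^':
--                 new_row += '^'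
--             else:
--                 new_row += '.'
--                 count += 1
--
--         last = new_row
--
--     return count
-- ===== SOURCE B (Python) =====
-- def part1(inp):
--     w = len(inp)
--     mask = (1 << w) - 1
--     patterns = ('^^.', '.^^', '^..', '..^')
--     padded = '.' + inp + '.'
--     row = 0                      # first generated row; bit i set <=> tile i is a trap
--     for i in range(w):
--         row |= (padded[i:i+3] in patterns) << i
--     safe = inp.count('.')
--     for _ in range(39):
--         safe += w - row.bit_count()
--         row = ((row << 1) ^ (row >> 1)) & mask
--     return safe
-- ===== Notes on version B (the rewrite author's own statement) =====
-- stated objective: faster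
-- what changed: A rebuilds each of 39 successive rows character by character, matching each (left,mid,right) triple against four pattern strings; B derives only the first generated row from the input string (one scan packing it into an integer bitmask, bit i = trap), then evolves the bitmask with shift/xor/mask word operations, counting each row's safe tiles as width minus popcount.
import Mathlib
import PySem

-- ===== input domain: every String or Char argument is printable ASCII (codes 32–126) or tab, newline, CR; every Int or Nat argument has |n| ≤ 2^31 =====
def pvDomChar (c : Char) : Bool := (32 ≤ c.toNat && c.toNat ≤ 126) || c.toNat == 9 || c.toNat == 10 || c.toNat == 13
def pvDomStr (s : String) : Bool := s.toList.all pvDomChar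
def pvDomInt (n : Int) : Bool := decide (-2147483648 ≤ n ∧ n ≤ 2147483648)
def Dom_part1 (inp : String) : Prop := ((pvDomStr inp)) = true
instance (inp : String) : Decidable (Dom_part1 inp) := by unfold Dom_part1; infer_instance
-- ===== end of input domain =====

-- B derives the first generated row from the string in one scan, then evolves it as an
-- integer bitmask with shift/xor/mask and a popcount per row (objective: faster).

-- ===== PORT A =====
-- Rows are kept as List Char. The guarded string indexings last[i-1], last[i], last[i+1]
-- are always in range, so pyGetD's default is unreachable; the 3-character string
-- comparisons a+b+c == '^^.' etc. are ported as the conjunction of the three character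
-- equalities.
def part1 (inp : String) : Int :=
  let _result : List (List Char) := [inp.toList]   -- result = [inp] (unused, as in A)
  let count : Int := (PySem.Str.count inp "." : Int)
  let last : List Char := inp.toList
  let fin := (PySem.List.pyRange 0 39 1).foldl
    (fun (st : Int × List Char) (_i : Int) =>
      let last := st.2
      let inner := (PySem.List.pyRange 0 (PySem.List.len last) 1).foldl
        (fun (s : List Char × Int) (i : Int) =>
          let a : Char := if i - 1 ≥ 0 then PySem.List.pyGetD last (i - 1) '.' else '.'
          let b : Char := PySem.List.pyGetD last i '.'
          let c : Char := if i + 1 < PySem.List.len last then PySem.List.pyGetD last (i + 1) '.' else '.'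
          if a = '^' ∧ b = '^' ∧ c = '.' then (s.1 ++ ['^'], s.2)
          else if a = '.' ∧ b = '^' ∧ c = '^' then (s.1 ++ ['^'], s.2)
          else if a = '^' ∧ b = '.' ∧ c = '.' then (s.1 ++ ['^'], s.2)
          else if a = '.' ∧ b = '.' ∧ c = '^' then (s.1 ++ ['^'], s.2)
          else (s.1 ++ ['.'], s.2 + 1))
        (([] : List Char), st.1)
      (inner.2, inner.1))
    (count, last)
  fin.1

-- ===== PORT B =====
-- Strings are worked with as List Char (PySem string functions are thin wrappers over
-- List Char): '.' + inp + '.' is the padded character list, padded[i:i+3] is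
-- PySem.List.slice, 'in patterns' is list membership. w, mask, row are Python ints that
-- stay nonnegative and are represented as Nat (<<</>>>/&&&/|||/^^^ on Nat are
-- Python-exact for nonnegative operands); safe stays Int. The loop index i of range(w)
-- is nonnegative, so the shift amount i.toNat is exact. (bool) << i is the 0/1
-- if-expression shifted; row.bit_count() is PySem.Int.bitCount.
def part1_alt (inp : String) : Int :=
  let w : Nat := inp.toList.length
  let mask : Nat := (1 <<< w) - 1
  let patterns : List (List Char) := [['^','^','.'], ['.','^','^'], ['^','.','.'], ['.','.','^']]
  let padded : List Char := '.' :: (inp.toList ++ ['.'])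
  let row : Nat := (PySem.List.pyRange 0 (w : Int) 1).foldl
    (fun (r : Nat) (i : Int) =>
      r ||| ((if PySem.List.slice padded (some i) (some (i + 3)) ∈ patterns then 1 else 0) <<< i.toNat))
    0
  let fin := (PySem.List.pyRange 0 39 1).foldl
    (fun (st : Int × Nat) (_i : Int) =>
      (st.1 + ((w : Int) - (PySem.Int.bitCount ((st.2 : Nat) : Int) : Int)),
       ((st.2 <<< 1) ^^^ (st.2 >>> 1)) &&& mask))
    ((PySem.Str.count inp "." : Int), row)
  fin.1

-- ===== PRECONDITION & SPEC =====
def Spec_part1 (inp : String) (out : Int) : Prop := out = part1_alt inp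
instance (inp : String) (out : Int) : Decidable (Spec_part1 inp out) := by unfold Spec_part1; infer_instance

-- ===== CLAIM (what is proved, stated in full; the proofs are below) =====
def Claim_equal_part1 : Prop := ∀ (inp : String), Dom_part1 inp → Spec_part1 inp (part1 inp)

-- ===== LEMMAS AND PROOFS =====

-- trap bits of a row ('^' = 1), little-endian: bit i describes tile i
def pvEnc (l : List Char) : Nat :=
  l.foldr (fun ch a => 2 * a + (if ch = '^' then 1 else 0)) 0

-- the character A produces at index i of the row derived from l
def pvRowf (l : List Char) (i : Nat) : Char :=
  let a : Char := if 1 ≤ i then l.getD (i - 1) '.' else '.'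
  let b : Char := l.getD i '.'
  let c : Char := if i + 1 < l.length then l.getD (i + 1) '.' else '.'
  if a = '^' ∧ b = '^' ∧ c = '.' then '^'
  else if a = '.' ∧ b = '^' ∧ c = '^' then '^'
  else if a = '^' ∧ b = '.' ∧ c = '.' then '^'
  else if a = '.' ∧ b = '.' ∧ c = '^' then '^'
  else '.'

-- the row A derives from l
def pvRowA (l : List Char) : List Char := (List.range l.length).map (pvRowf l)

theorem pvEnc_testBit (l : List Char) (i : Nat) :
    (pvEnc l).testBit i = decide (l.getD i '.' = '^') := by
  induction l generalizing i with
  | nil => simp [pvEnc]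
  | cons ch t ih =>
    cases i with
    | zero =>
      simp only [pvEnc, List.foldr_cons, List.getD_cons_zero, Nat.testBit_zero]
      split_ifs with h <;> simp [h]
    | succ i =>
      have h2 : (2 * (pvEnc t) + (if ch = '^' then 1 else 0)) / 2 = pvEnc t := by
        split_ifs <;> omega
      simp only [pvEnc, List.foldr_cons, Nat.testBit_add_one, List.getD_cons_succ] at *
      rw [h2]; exact ih i

theorem pvBitCount_enc (l : List Char) :
    PySem.Int.bitCount ((pvEnc l : Nat) : Int) = l.count '^' := by
  induction l with
  | nil => simp [pvEnc, PySem.Int.bitCount_zero]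
  | cons ch t ih =>
    have key : ∀ (a b : Nat), b ≤ 1 →
        PySem.Int.bitCount ((2 * a + b : Nat) : Int) = b + PySem.Int.bitCount (a : Int) := by
      intro a b hb
      by_cases h0 : 2 * a + b = 0
      · have : a = 0 ∧ b = 0 := by omega
        simp [this.1, this.2]
      · rw [PySem.Int.bitCount_natCast (by omega)]
        have h1 : (2 * a + b) % 2 = b := by omega
        have h2 : (2 * a + b) / 2 = a := by omega
        rw [h1, h2]
    simp only [pvEnc, List.foldr_cons] at *
    by_cases h : ch = '^'
    · rw [if_pos h, key _ 1 (le_refl 1), ih, h]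
      simp; omega
    · rw [if_neg h, key _ 0 (by omega), ih]
      simp [h]

theorem pvCount_dot (l : List Char) (h : ∀ ch ∈ l, ch = '.' ∨ ch = '^') :
    l.count '.' + l.count '^' = l.length := by
  induction l with
  | nil => simp
  | cons ch t ih =>
    have hc := h ch (by simp)
    have ht := ih (fun x hx => h x (by simp [hx]))
    rcases hc with hc | hc <;> subst hc <;> simp_all <;> omega

theorem pvLen_rowA (l : List Char) : (pvRowA l).length = l.length := by
  simp [pvRowA]

theorem pvRowA_getD (l : List Char) (i : Nat) (h : i < l.length) :
    (pvRowA l).getD i '.' = pvRowf l i := by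
  simp [pvRowA, List.getD, h]

theorem pvRowA_getD_ge (l : List Char) (i : Nat) (h : ¬ i < l.length) :
    (pvRowA l).getD i '.' = '.' := by
  have h2 : (List.range l.length)[i]? = none := by
    rw [List.getElem?_eq_none_iff]; simpa using h
  simp [pvRowA, List.getD, h2]

theorem pvRowf_cases (l : List Char) (i : Nat) : pvRowf l i = '^' ∨ pvRowf l i = '.' := by
  have key : ∀ (p q r s : Prop) [Decidable p] [Decidable q] [Decidable r] [Decidable s],
      (if p then '^' else if q then '^' else if r then '^' else if s then '^' else '.') = '^' ∨
      (if p then '^' else if q then '^' else if r then '^' else if s then '^' else '.') = '.' := by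
    intros p q r s _ _ _ _; split_ifs <;> simp
  exact key _ _ _ _

theorem pvRowA_mem (l : List Char) : ∀ ch ∈ pvRowA l, ch = '.' ∨ ch = '^' := by
  intro ch hch
  rcases List.mem_map.mp hch with ⟨k, _, hk⟩
  rcases pvRowf_cases l k with h | h <;> rw [← hk, h] <;> simp

-- the crux: on an all-'.'/'^' row, A's string step computes exactly B's bit step
theorem pvStep_enc (l : List Char) (h : ∀ ch ∈ l, ch = '.' ∨ ch = '^') :
    pvEnc (pvRowA l) = ((pvEnc l <<< 1) ^^^ (pvEnc l >>> 1)) &&& ((1 <<< l.length) - 1) := by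
  apply Nat.eq_of_testBit_eq
  intro i
  rw [pvEnc_testBit, Nat.testBit_and, Nat.testBit_xor, Nat.testBit_shiftLeft,
    Nat.testBit_shiftRight, Nat.one_shiftLeft, Nat.testBit_two_pow_sub_one,
    pvEnc_testBit, pvEnc_testBit, Nat.add_comm 1 i]
  by_cases hi : i < l.length
  · rw [pvRowA_getD l i hi, pvRowf]
    have hy : l.getD i '.' = '.' ∨ l.getD i '.' = '^' := by
      rw [List.getD_eq_getElem _ _ hi]; exact h _ (l.getElem_mem hi)
    have hz : l.getD (i + 1) '.' = '.' ∨ l.getD (i + 1) '.' = '^' := by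
      by_cases h1 : i + 1 < l.length
      · rw [List.getD_eq_getElem _ _ h1]; exact h _ (l.getElem_mem h1)
      · left; exact List.getD_eq_default _ _ (by omega)
    have hcz : (if i + 1 < l.length then l.getD (i + 1) '.' else '.') = l.getD (i + 1) '.' := by
      split_ifs with h1
      · rfl
      · exact (List.getD_eq_default _ _ (by omega)).symm
    rw [hcz]
    have hlt : decide (i < l.length) = true := by simpa using hi
    by_cases h1 : 1 ≤ i
    · have hx : l.getD (i - 1) '.' = '.' ∨ l.getD (i - 1) '.' = '^' := by
        rw [List.getD_eq_getElem _ _ (by omega)]; exact h _ (l.getElem_mem (by omega))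
      have d1 : decide (1 ≤ i) = true := by simpa using h1
      rw [if_pos h1, d1, hlt]
      rcases hx with hx | hx <;> rcases hy with hy | hy <;> rcases hz with hz | hz <;>
        simp_all
    · have h0 : i = 0 := by omega
      subst h0
      have d1 : decide (1 ≤ (0:Nat)) = false := by simp
      rw [if_neg h1, d1, hlt]
      rcases hy with hy | hy <;> rcases hz with hz | hz <;> simp_all
  · rw [pvRowA_getD_ge l i hi]
    have : decide (i < l.length) = false := by simpa using hi
    simp [this]

-- A's inner loop builds pvRowA and counts its '.' characters
theorem pvInner (last : List Char) (cnt : Int) :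
    (PySem.List.pyRange 0 (PySem.List.len last) 1).foldl
        (fun (s : List Char × Int) (i : Int) =>
          let a : Char := if i - 1 ≥ 0 then PySem.List.pyGetD last (i - 1) '.' else '.'
          let b : Char := PySem.List.pyGetD last i '.'
          let c : Char := if i + 1 < PySem.List.len last then PySem.List.pyGetD last (i + 1) '.' else '.'
          if a = '^' ∧ b = '^' ∧ c = '.' then (s.1 ++ ['^'], s.2)
          else if a = '.' ∧ b = '^' ∧ c = '^' then (s.1 ++ ['^'], s.2)
          else if a = '^' ∧ b = '.' ∧ c = '.' then (s.1 ++ ['^'], s.2)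
          else if a = '.' ∧ b = '.' ∧ c = '^' then (s.1 ++ ['^'], s.2)
          else (s.1 ++ ['.'], s.2 + 1))
        (([] : List Char), cnt)
      = (pvRowA last, cnt + ((pvRowA last).count '.' : Int)) := by
  have hrange : PySem.List.pyRange 0 (PySem.List.len last) 1
      = (List.range last.length).map (fun (k : Nat) => (k : Int)) := by
    rw [PySem.List.len_eq, PySem.List.pyRange_one]
    have h1 : ((last.length : Int) - 0).toNat = last.length := by omega
    rw [h1]
    exact List.map_congr_left (fun k _ => by simp)
  have hbody : ∀ (s : List Char × Int) (k : Nat), k < last.length →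
      (fun (s : List Char × Int) (i : Int) =>
          let a : Char := if i - 1 ≥ 0 then PySem.List.pyGetD last (i - 1) '.' else '.'
          let b : Char := PySem.List.pyGetD last i '.'
          let c : Char := if i + 1 < PySem.List.len last then PySem.List.pyGetD last (i + 1) '.' else '.'
          if a = '^' ∧ b = '^' ∧ c = '.' then (s.1 ++ ['^'], s.2)
          else if a = '.' ∧ b = '^' ∧ c = '^' then (s.1 ++ ['^'], s.2)
          else if a = '^' ∧ b = '.' ∧ c = '.' then (s.1 ++ ['^'], s.2)
          else if a = '.' ∧ b = '.' ∧ c = '^' then (s.1 ++ ['^'], s.2)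
          else (s.1 ++ ['.'], s.2 + 1)) s (k : Int)
      = (s.1 ++ [pvRowf last k], if pvRowf last k = '.' then s.2 + 1 else s.2) := by
    intro s k hk
    have ha : (if (k : Int) - 1 ≥ 0 then PySem.List.pyGetD last ((k : Int) - 1) '.' else '.')
        = (if 1 ≤ k then last.getD (k - 1) '.' else '.') := by
      by_cases h1 : 1 ≤ k
      · rw [if_pos (by omega), if_pos h1]
        have : (k : Int) - 1 = ((k - 1 : Nat) : Int) := by omega
        rw [this, PySem.List.pyGetD_natCast]
      · have h0 : k = 0 := by omega
        subst h0; simp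
    have hb : PySem.List.pyGetD last (k : Int) '.' = last.getD k '.' := by
      rw [PySem.List.pyGetD_natCast]
    have hc : (if (k : Int) + 1 < PySem.List.len last then PySem.List.pyGetD last ((k : Int) + 1) '.' else '.')
        = (if k + 1 < last.length then last.getD (k + 1) '.' else '.') := by
      have : (k : Int) + 1 = ((k + 1 : Nat) : Int) := by omega
      rw [this, PySem.List.pyGetD_natCast, PySem.List.len_eq]
      by_cases h1 : k + 1 < last.length
      · rw [if_pos (by exact_mod_cast h1), if_pos h1]
      · rw [if_neg (by exact_mod_cast h1), if_neg h1]
    simp only [ha, hb, hc, pvRowf]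
    split_ifs <;> simp_all
  rw [hrange, List.foldl_map]
  refine (PySem.List.foldl_congr_mem (g := fun (s : List Char × Int) (k : Nat) =>
        (s.1 ++ [pvRowf last k], if pvRowf last k = '.' then s.2 + 1 else s.2))
      _ _ _ (fun acc k hk => hbody acc k (by simpa using hk))).trans ?_
  rw [PySem.List.foldl_prod_mk (f := fun (r : List Char) (k : Nat) => r ++ [pvRowf last k])
        (g := fun (c : Int) (k : Nat) => if pvRowf last k = '.' then c + 1 else c)]
  rw [PySem.List.foldl_append_singleton_eq_map, PySem.List.foldl_ite_add_one]
  simp only [pvRowA, List.count, List.countP_map, Function.comp_def]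
  refine congrArg _ (congrArg _ (congrArg _ (List.countP_congr (fun x _ => ?_))))
  simp [beq_iff_eq]

-- named copies of the two ports' outer loop bodies (definitionally equal to them)
def pvStepA : (Int × List Char) → Int → (Int × List Char) :=
  fun (st : Int × List Char) (_i : Int) =>
    let last := st.2
    let inner := (PySem.List.pyRange 0 (PySem.List.len last) 1).foldl
      (fun (s : List Char × Int) (i : Int) =>
        let a : Char := if i - 1 ≥ 0 then PySem.List.pyGetD last (i - 1) '.' else '.'
        let b : Char := PySem.List.pyGetD last i '.'
        let c : Char := if i + 1 < PySem.List.len last then PySem.List.pyGetD last (i + 1) '.' else '.'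
        if a = '^' ∧ b = '^' ∧ c = '.' then (s.1 ++ ['^'], s.2)
        else if a = '.' ∧ b = '^' ∧ c = '^' then (s.1 ++ ['^'], s.2)
        else if a = '^' ∧ b = '.' ∧ c = '.' then (s.1 ++ ['^'], s.2)
        else if a = '.' ∧ b = '.' ∧ c = '^' then (s.1 ++ ['^'], s.2)
        else (s.1 ++ ['.'], s.2 + 1))
      (([] : List Char), st.1)
    (inner.2, inner.1)

def pvStepB (w : Nat) : (Int × Nat) → Int → (Int × Nat) :=
  fun (st : Int × Nat) (_i : Int) =>
    (st.1 + ((w : Int) - (PySem.Int.bitCount ((st.2 : Nat) : Int) : Int)),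
     ((st.2 <<< 1) ^^^ (st.2 >>> 1)) &&& ((1 <<< w) - 1))

theorem pvStepA_eq (cnt : Int) (last : List Char) (i : Int) :
    pvStepA (cnt, last) i = (cnt + ((pvRowA last).count '.' : Int), pvRowA last) := by
  show ((_ : List Char × Int).2, (_ : List Char × Int).1) = _
  rw [pvInner]

-- the '.'-count A adds per generated row agrees with width minus popcount
theorem pvCountRow (l : List Char) :
    ((pvRowA l).count '.' : Int)
      = (l.length : Int) - (PySem.Int.bitCount ((pvEnc (pvRowA l) : Nat) : Int) : Int) := by
  have h1 := pvCount_dot (pvRowA l) (pvRowA_mem l)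
  rw [pvBitCount_enc, pvLen_rowA] at *
  omega

-- the first three elements of a drop, as getD values
theorem pvTake3 (l : List Char) (k : Nat) (h : k + 3 ≤ l.length) :
    (l.drop k).take 3 = [l.getD k ' ', l.getD (k + 1) ' ', l.getD (k + 2) ' '] := by
  have h0 : l.drop k = l[k] :: l.drop (k + 1) := (List.getElem_cons_drop (by omega)).symm
  have h1 : l.drop (k + 1) = l[k + 1] :: l.drop (k + 2) := (List.getElem_cons_drop (by omega)).symm
  have h2 : l.drop (k + 2) = l[k + 2] :: l.drop (k + 3) := (List.getElem_cons_drop (by omega)).symm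
  rw [h0, h1, h2]
  simp only [List.take_succ_cons, List.take_zero]
  rw [List.getD_eq_getElem _ _ (by omega), List.getD_eq_getElem _ _ (by omega),
    List.getD_eq_getElem _ _ (by omega)]
  rfl

def pvPatterns : List (List Char) := [['^','^','.'], ['.','^','^'], ['^','.','.'], ['.','.','^']]

-- B's slice-membership test at index k reads exactly A's triple rule
theorem pvPat (l : List Char) (k : Nat) (hk : k < l.length) :
    (PySem.List.slice ('.' :: (l ++ ['.'])) (some (k : Int)) (some ((k : Int) + 3)) ∈ pvPatterns)
      ↔ pvRowf l k = '^' := by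
  have hslice : PySem.List.slice ('.' :: (l ++ ['.'])) (some (k : Int)) (some ((k : Int) + 3))
      = (('.' :: (l ++ ['.'])).drop k).take 3 := by
    have h3 : (k : Int) + 3 = ((k + 3 : Nat) : Int) := by push_cast; ring
    rw [h3, PySem.List.slice_natCast]
    congr 1
    omega
  have hlen : ('.' :: (l ++ ['.'])).length = l.length + 2 := by simp
  rw [hslice, pvTake3 _ k (by omega)]
  have ha : ('.' :: (l ++ ['.'])).getD k ' ' = (if 1 ≤ k then l.getD (k - 1) '.' else '.') := by
    cases k with
    | zero => simp
    | succ n =>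
      have hn : n < l.length := by omega
      rw [List.getD_cons_succ, if_pos (by omega),
        List.getD_eq_getElem _ _ (by simp; omega), List.getElem_append_left hn,
        show n + 1 - 1 = n from rfl, List.getD_eq_getElem _ _ hn]
  have hb : ('.' :: (l ++ ['.'])).getD (k + 1) ' ' = l.getD k '.' := by
    rw [List.getD_cons_succ,
      List.getD_eq_getElem _ _ (by simp; omega), List.getElem_append_left hk,
      List.getD_eq_getElem _ _ hk]
  have hc : ('.' :: (l ++ ['.'])).getD (k + 2) ' '
      = (if k + 1 < l.length then l.getD (k + 1) '.' else '.') := by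
    rw [List.getD_cons_succ]
    by_cases h1 : k + 1 < l.length
    · rw [if_pos h1, List.getD_eq_getElem _ _ (by simp; omega), List.getElem_append_left h1,
        List.getD_eq_getElem _ _ h1]
    · have he : k + 1 = l.length := by omega
      rw [if_neg h1, List.getD_eq_getElem _ _ (by simp; omega)]
      rw [List.getElem_append_right (by omega)]
      simp [he]
  rw [ha, hb, hc, pvRowf]
  simp only [pvPatterns, List.mem_cons, List.not_mem_nil, or_false, List.cons.injEq, and_true]
  split_ifs <;> simp_all

-- the OR-accumulating parse loop, bit by bit
theorem pvOrFold (P : Nat → Prop) [DecidablePred P] (w j : Nat) :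
    ((List.range w).foldl (fun r k => r ||| ((if P k then 1 else 0) <<< k)) 0).testBit j
      = (decide (j < w) && decide (P j)) := by
  induction w with
  | zero => simp
  | succ n ih =>
    rw [List.range_succ, List.foldl_append, List.foldl_cons, List.foldl_nil,
      Nat.testBit_or, ih, Nat.testBit_shiftLeft]
    rcases lt_trichotomy j n with h | h | h
    · have d1 : decide (j < n) = true := by simpa using h
      have d2 : decide (j < n + 1) = true := by simp; omega
      have d3 : decide (n ≤ j) = false := by simp; omega
      rw [d1, d2, d3]
      simp
    · subst h
      have d1 : decide (j < j) = false := by simp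
      have d2 : decide (j < j + 1) = true := by simp
      have d3 : decide (j ≤ j) = true := by simp
      rw [d1, d2, d3]
      have hbit : ((if P j then 1 else 0 : Nat)).testBit (j - j) = decide (P j) := by
        rw [Nat.sub_self]
        split_ifs with hp <;> simp [hp]
      rw [hbit]
      simp
    · have d1 : decide (j < n) = false := by simp; omega
      have d2 : decide (j < n + 1) = false := by simp; omega
      have hbit : ((if P n then 1 else 0 : Nat)).testBit (j - n) = false := by
        have : j - n = (j - n - 1) + 1 := by omega
        rw [this]
        split_ifs <;> simp [Nat.testBit_add_one]
      rw [d1, d2, hbit]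
      simp
  
-- B's parse loop computes the trap bits of the first generated row
theorem pvRow1 (l : List Char) :
    (PySem.List.pyRange 0 (l.length : Int) 1).foldl
      (fun (r : Nat) (i : Int) =>
        r ||| ((if PySem.List.slice ('.' :: (l ++ ['.'])) (some i) (some (i + 3)) ∈ pvPatterns
                then 1 else 0) <<< i.toNat))
      0
    = pvEnc (pvRowA l) := by
  have hrange : PySem.List.pyRange 0 (l.length : Int) 1
      = (List.range l.length).map (fun (k : Nat) => (k : Int)) := by
    rw [PySem.List.pyRange_one]
    have h1 : ((l.length : Int) - 0).toNat = l.length := by omega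
    rw [h1]
    exact List.map_congr_left (fun k _ => by simp)
  rw [hrange, List.foldl_map]
  have hcongr : (fun (r : Nat) (k : Nat) =>
      r ||| ((if PySem.List.slice ('.' :: (l ++ ['.'])) (some (k : Int)) (some ((k : Int) + 3)) ∈ pvPatterns
              then 1 else 0) <<< (k : Int).toNat))
    = (fun (r : Nat) (k : Nat) =>
      r ||| ((if PySem.List.slice ('.' :: (l ++ ['.'])) (some (k : Int)) (some ((k : Int) + 3)) ∈ pvPatterns
              then 1 else 0) <<< k)) := by
    funext r k
    simp
  rw [hcongr]
  apply Nat.eq_of_testBit_eq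
  intro j
  rw [pvOrFold (fun k =>
      PySem.List.slice ('.' :: (l ++ ['.'])) (some (k : Int)) (some ((k : Int) + 3)) ∈ pvPatterns)
    l.length j]
  rw [pvEnc_testBit]
  by_cases hj : j < l.length
  · have d1 : decide (j < l.length) = true := by simpa using hj
    rw [d1, pvRowA_getD l j hj]
    simp only [Bool.true_and]
    exact decide_eq_decide.mpr (pvPat l j hj)
  · have d1 : decide (j < l.length) = false := by simpa using hj
    rw [d1, pvRowA_getD_ge l j hj]
    simp

-- lockstep: A's string state and B's bit state stay one row apart in representation
theorem pvLock (w : Nat) (it : List Int) : ∀ (l : List Char) (cnt : Int), l.length = w →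
    it.foldl (pvStepB w) (cnt, pvEnc (pvRowA l))
      = ((it.foldl pvStepA (cnt, l)).1,
         pvEnc (pvRowA (it.foldl pvStepA (cnt, l)).2)) := by
  induction it with
  | nil => intro l cnt _; rfl
  | cons head tail ih =>
    intro l cnt hw
    rw [List.foldl_cons, List.foldl_cons, pvStepA_eq]
    have hs : pvStepB w (cnt, pvEnc (pvRowA l)) head
        = (cnt + ((pvRowA l).count '.' : Int), pvEnc (pvRowA (pvRowA l))) := by
      unfold pvStepB
      dsimp only
      rw [← hw]
      have hlen : l.length = (pvRowA l).length := (pvLen_rowA l).symm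
      rw [hlen, ← pvStep_enc (pvRowA l) (pvRowA_mem l)]
      simp only [Prod.mk.injEq]
      refine ⟨?_, trivial⟩
      rw [pvCountRow, pvLen_rowA]
    rw [hs]
    exact ih (pvRowA l) _ (by rw [pvLen_rowA, hw])

-- ===== VERDICT (by name: the statement is the Claim_ definition above) =====
theorem part1_spec : Claim_equal_part1 := by
  intro inp _
  show part1 inp = part1_alt inp
  show ((PySem.List.pyRange 0 39 1).foldl pvStepA ((PySem.Str.count inp "." : Int), inp.toList)).1
      = ((PySem.List.pyRange 0 39 1).foldl (pvStepB inp.toList.length)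
          ((PySem.Str.count inp "." : Int),
           (PySem.List.pyRange 0 (inp.toList.length : Int) 1).foldl
             (fun (r : Nat) (i : Int) =>
               r ||| ((if PySem.List.slice ('.' :: (inp.toList ++ ['.'])) (some i) (some (i + 3)) ∈ pvPatterns
                       then 1 else 0) <<< i.toNat))
             0)).1
  rw [pvRow1, pvLock inp.toList.length (PySem.List.pyRange 0 39 1) inp.toList _ rfl]
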